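-- pv_equiv track=rewrite | github.com/jumpstarter-dev/jumpstarter | python/packages/jumpstarter-cli/jumpstarter_cli/proto_languages/java.py | _pascal_to_camel
-- ===== SOURCE A (Python) =====
-- def _pascal_to_camel(name: str) -> str:
--     """Convert PascalCase to camelCase: 'ReadPower' -> 'readPower'."""
--     if not name:
--         return name
--     # Handle consecutive capitals: "HTTPSConnect" -> "httpsConnect"
--     i = 0
--     while i < len(name) - 1 and name[i].isupper() and name[i + 1].isupper():
--         i += 1
--     if i == 0:
--         return name[0].lower() + name[1:]
--     # All uppercase or leading acronym
--     return name[:i].lower() + name[i:]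
-- ===== SOURCE B (Python) =====
-- def _pascal_to_camel(name: str) -> str:
--     """Convert PascalCase to camelCase: 'ReadPower' -> 'readPower'."""
--     if not name:
--         return name
--     # Recursively lowercase the head while the next two characters continue
--     # an uppercase run; otherwise lowercase just the head and stop.
--     if len(name) >= 3 and name[0].isupper() and name[1].isupper() and name[2].isupper():
--         return name[0].lower() + _pascal_to_camel(name[1:])
--     return name[0].lower() + name[1:]
-- ===== Notes on version B (the rewrite author's own statement) =====
-- stated objective: alternative
-- what changed: Replaces A's index-based pairwise-lookahead while loop plus slice-and-lower of the computed prefix by a structural recursion that emits the lowercased head character while the next two characters continue an uppercase run, building the result front-to-back with no index arithmetic or prefix slicing.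
import Mathlib
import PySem

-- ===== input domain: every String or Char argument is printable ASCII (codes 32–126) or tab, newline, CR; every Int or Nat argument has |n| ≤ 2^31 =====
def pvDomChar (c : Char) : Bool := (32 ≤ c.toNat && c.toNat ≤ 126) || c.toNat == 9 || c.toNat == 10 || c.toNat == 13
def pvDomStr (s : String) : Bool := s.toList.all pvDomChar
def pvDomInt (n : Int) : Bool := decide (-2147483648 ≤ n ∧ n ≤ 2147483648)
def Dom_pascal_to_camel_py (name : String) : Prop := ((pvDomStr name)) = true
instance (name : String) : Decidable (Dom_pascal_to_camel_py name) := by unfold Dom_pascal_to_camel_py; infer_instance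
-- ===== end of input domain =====

-- B replaces A's index-based lookahead while loop and slicing by a recursion
-- that lowercases the head while the next two characters continue an
-- uppercase run (objective: alternative decomposition, same cost).

-- ===== PORT A =====
-- the while loop: 'while i < len(name) - 1 and name[i].isupper() and name[i+1].isupper(): i += 1'
def pvLoopA (cs : List Char) (i : Nat) : Nat :=
  if h : i < cs.length - 1 ∧
      (PySem.List.pyGet? cs (i : Int)).any PySem.Chars.isupper = true ∧
      (PySem.List.pyGet? cs ((i : Int) + 1)).any PySem.Chars.isupper = true then
    pvLoopA cs (i + 1)
  else i
termination_by cs.length - i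
decreasing_by omega

def pascal_to_camel_py (name : String) : String :=
  if name = "" then name
  else
    let i := pvLoopA name.toList 0
    if i = 0 then
      -- name[0].lower() + name[1:]
      PySem.Str.lower (String.ofList [name.toList.headD ' ']) ++ PySem.Str.slice name (some 1) none
    else
      -- name[:i].lower() + name[i:]
      PySem.Str.lower (PySem.Str.slice name none (some (i : Int))) ++ PySem.Str.slice name (some (i : Int)) none

-- ===== PORT B =====
-- recursion of Source B over the character list:
-- 'if len(name) >= 3 and name[0].isupper() and name[1].isupper() and name[2].isupper():
--      return name[0].lower() + _pascal_to_camel(name[1:])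
--  return name[0].lower() + name[1:]'
-- (name[0].lower() on a one-character string is lowerChar of that character)
def pvAltRec (s : List Char) : List Char :=
  match s with
  | [] => []
  | c0 :: rest =>
    match rest with
    | c1 :: c2 :: _ =>
      if PySem.Chars.isupper c0 && PySem.Chars.isupper c1 && PySem.Chars.isupper c2 then
        PySem.Chars.lowerChar c0 :: pvAltRec rest
      else
        PySem.Chars.lowerChar c0 :: rest
    | _ => PySem.Chars.lowerChar c0 :: rest

def pascal_to_camel_py_alt (name : String) : String :=
  if name = "" then name
  else String.ofList (pvAltRec name.toList)

-- ===== PRECONDITION & SPEC =====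
def Spec_pascal_to_camel_py (name : String) (out : String) : Prop := out = pascal_to_camel_py_alt name
instance (name : String) (out : String) : Decidable (Spec_pascal_to_camel_py name out) := by unfold Spec_pascal_to_camel_py; infer_instance

-- ===== CLAIM (what is proved, stated in full; the proofs are below) =====
def Claim_equal_pascal_to_camel_py : Prop := ∀ (name : String), Dom_pascal_to_camel_py name → Spec_pascal_to_camel_py name (pascal_to_camel_py name)

-- ===== LEMMAS AND PROOFS =====

-- inside the leading takeWhile run every element satisfies the predicate
theorem takeWhile_any_lt {p : Char → Bool} (cs : List Char) (j : Nat)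
    (hj : j < (cs.takeWhile p).length) : (cs[j]?).any p = true := by
  induction cs generalizing j with
  | nil => simp at hj
  | cons a l ih =>
    by_cases hp : p a
    · cases j with
      | zero => simpa using hp
      | succ j =>
        simp only [List.takeWhile_cons_of_pos hp, List.length_cons] at hj
        simpa using ih j (by omega)
    · simp [List.takeWhile_cons_of_neg (by simpa using hp)] at hj

-- just past the run the predicate fails (or the list has ended)
theorem takeWhile_any_stop {p : Char → Bool} (cs : List Char) :
    (cs[(cs.takeWhile p).length]?).any p = false := by
  induction cs with
  | nil => simp
  | cons a l ih =>
    by_cases hp : p a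
    · simpa [List.takeWhile_cons_of_pos hp] using ih
    · simpa [List.takeWhile_cons_of_neg (by simpa using hp)] using (by simpa using hp)

theorem takeWhile_len_le {p : Char → Bool} (cs : List Char) :
    (cs.takeWhile p).length ≤ cs.length :=
  (List.takeWhile_prefix p).length_le

-- A's loop stops exactly at max(run length, 1) - 1
theorem pvLoopA_eq (cs : List Char) (i : Nat)
    (hi : i + 1 ≤ max ((cs.takeWhile PySem.Chars.isupper).length) 1)
    (hne : cs ≠ []) :
    pvLoopA cs i = max ((cs.takeWhile PySem.Chars.isupper).length) 1 - 1 := by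
  set C := (cs.takeWhile PySem.Chars.isupper).length with hC
  have hClen : C ≤ cs.length := takeWhile_len_le cs
  have hlen : 1 ≤ cs.length := by
    cases cs with
    | nil => exact absurd rfl hne
    | cons a l => simp
  have hcast : ((i : Int) + 1) = ((i + 1 : Nat) : Int) := by push_cast; ring
  have hgn : ∀ j : Nat, PySem.List.pyGet? cs (j : Int) = cs[j]? := by intro j; simp
  have hg1 : PySem.List.pyGet? cs (i : Int) = cs[i]? := hgn i
  have hg2 : PySem.List.pyGet? cs ((i : Int) + 1) = cs[i+1]? := by rw [hcast]; exact hgn (i+1)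
  rw [pvLoopA]
  by_cases hcond : i + 1 < C
  · have h1 : (cs[i]?).any PySem.Chars.isupper = true := takeWhile_any_lt cs i (by omega)
    have h2 : (cs[i+1]?).any PySem.Chars.isupper = true := takeWhile_any_lt cs (i+1) (by omega)
    rw [dif_pos ⟨by omega, by rw [hg1]; exact h1, by rw [hg2]; exact h2⟩]
    exact pvLoopA_eq cs (i + 1) (by omega) hne
  · have hstop : ¬ (i < cs.length - 1 ∧
        (PySem.List.pyGet? cs (i : Int)).any PySem.Chars.isupper = true ∧
        (PySem.List.pyGet? cs ((i : Int) + 1)).any PySem.Chars.isupper = true) := by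
      rintro ⟨hlt, hu1, hu2⟩
      rw [hg1] at hu1; rw [hg2] at hu2
      have : i + 1 = C ∨ (C = 0 ∧ i = 0) := by omega
      rcases this with heq | ⟨hCz, hi0⟩
      · have := takeWhile_any_stop (p := PySem.Chars.isupper) cs
        rw [← hC, ← heq] at this
        rw [hu2] at this; exact absurd this (by simp)
      · have := takeWhile_any_stop (p := PySem.Chars.isupper) cs
        rw [← hC, hCz] at this
        rw [hi0] at hu1
        rw [hu1] at this; exact absurd this (by simp)
    rw [dif_neg hstop]
    omega
termination_by cs.length - i
decreasing_by omega

-- B's recursion lowercases exactly the first max(run length - 1, 1) characters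
theorem pvAltRec_eq (cs : List Char) (hne : cs ≠ []) :
    pvAltRec cs =
      (cs.take (max ((cs.takeWhile PySem.Chars.isupper).length - 1) 1)).map PySem.Chars.lowerChar
        ++ cs.drop (max ((cs.takeWhile PySem.Chars.isupper).length - 1) 1) := by
  match cs with
  | [c0] =>
    have h1 : max (([c0].takeWhile PySem.Chars.isupper).length - 1) 1 = 1 := by
      by_cases h0 : PySem.Chars.isupper c0 <;> simp [List.takeWhile, h0]
    rw [h1]; simp [pvAltRec]
  | [c0, c1] =>
    have : max (([c0, c1].takeWhile PySem.Chars.isupper).length - 1) 1 = 1 := by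
      by_cases h0 : PySem.Chars.isupper c0 <;> by_cases h1 : PySem.Chars.isupper c1 <;>
        simp [List.takeWhile, h0, h1]
    rw [this]; simp [pvAltRec]
  | c0 :: c1 :: c2 :: t =>
    by_cases hall : PySem.Chars.isupper c0 && PySem.Chars.isupper c1 && PySem.Chars.isupper c2
    · have h0 : PySem.Chars.isupper c0 = true := by simp at hall; exact hall.1.1
      have h1 : PySem.Chars.isupper c1 = true := by simp at hall; exact hall.1.2
      have h2 : PySem.Chars.isupper c2 = true := by simp at hall; exact hall.2
      have ih := pvAltRec_eq (c1 :: c2 :: t) (by simp)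
      have hCr : ((c1 :: c2 :: t).takeWhile PySem.Chars.isupper).length ≥ 2 := by
        simp [List.takeWhile, h1, h2]
      set Cr := ((c1 :: c2 :: t).takeWhile PySem.Chars.isupper).length with hCrdef
      have hC : ((c0 :: c1 :: c2 :: t).takeWhile PySem.Chars.isupper).length = Cr + 1 := by
        simp [List.takeWhile_cons_of_pos h0, hCrdef]
      rw [show pvAltRec (c0 :: c1 :: c2 :: t)
            = PySem.Chars.lowerChar c0 :: pvAltRec (c1 :: c2 :: t) by
          simp [pvAltRec, h0, h1, h2]]
      rw [ih]
      have hmax' : max (((c0 :: c1 :: c2 :: t).takeWhile PySem.Chars.isupper).length - 1) 1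
          = (max (Cr - 1) 1) + 1 := by rw [hC]; omega
      rw [hmax']
      simp
    · have h1 : max (((c0 :: c1 :: c2 :: t).takeWhile PySem.Chars.isupper).length - 1) 1 = 1 := by
        by_cases h0 : PySem.Chars.isupper c0
        · by_cases hb : PySem.Chars.isupper c1
          · have h2 : PySem.Chars.isupper c2 = false := by
              simp [h0, hb] at hall; simpa using hall
            simp [List.takeWhile, h0, hb, h2]
          · have hb' : PySem.Chars.isupper c1 = false := by simpa using hb
            simp [List.takeWhile, h0, hb']
        · have h0' : PySem.Chars.isupper c0 = false := by simpa using h0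
          simp [List.takeWhile, h0']
      rw [h1]
      rw [show pvAltRec (c0 :: c1 :: c2 :: t)
            = PySem.Chars.lowerChar c0 :: c1 :: c2 :: t by
          simp only [pvAltRec]; rw [if_neg (by simpa using hall)]]
      simp

-- common shape: A's string expression for a cut at j equals the list form
theorem lower_cut_eq (s : String) (j : Nat) :
    PySem.Str.lower (PySem.Str.slice s none (some (j : Int))) ++ PySem.Str.slice s (some (j : Int)) none
      = String.ofList ((s.toList.take j).map PySem.Chars.lowerChar ++ s.toList.drop j) := by
  have hl : (PySem.Str.lower (PySem.Str.slice s none (some (j : Int))) ++ PySem.Str.slice s (some (j : Int)) none).toList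
      = (s.toList.take j).map PySem.Chars.lowerChar ++ s.toList.drop j := by
    simp [PySem.Str.toList_slice, PySem.Chars.slice_eq_listSlice,
      PySem.List.slice_to_natCast, PySem.List.slice_from_natCast, PySem.Chars.lower]
  calc PySem.Str.lower (PySem.Str.slice s none (some (j : Int))) ++ PySem.Str.slice s (some (j : Int)) none
      = String.ofList (PySem.Str.lower (PySem.Str.slice s none (some (j : Int))) ++ PySem.Str.slice s (some (j : Int)) none).toList :=
        String.ofList_toList.symm
    _ = _ := by rw [hl]

-- A's i = 0 branch is the cut at 1
theorem branch_zero_eq (s : String) (h : s.toList ≠ []) :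
    PySem.Str.lower (String.ofList [s.toList.headD ' ']) ++ PySem.Str.slice s (some 1) none
      = String.ofList ((s.toList.take 1).map PySem.Chars.lowerChar ++ s.toList.drop 1) := by
  have hl : (PySem.Str.lower (String.ofList [s.toList.headD ' ']) ++ PySem.Str.slice s (some 1) none).toList
      = (s.toList.take 1).map PySem.Chars.lowerChar ++ s.toList.drop 1 := by
    cases hc : s.toList with
    | nil => exact absurd hc h
    | cons a l =>
      simp [PySem.Str.toList_slice, PySem.Chars.slice_eq_listSlice,
        PySem.List.slice_from_one, hc, PySem.Chars.lower]
  calc PySem.Str.lower (String.ofList [s.toList.headD ' ']) ++ PySem.Str.slice s (some 1) none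
      = String.ofList (PySem.Str.lower (String.ofList [s.toList.headD ' ']) ++ PySem.Str.slice s (some 1) none).toList :=
        String.ofList_toList.symm
    _ = _ := by rw [hl]

-- ===== VERDICT (by name: the statement is the Claim_ definition above) =====
theorem pascal_to_camel_py_spec : Claim_equal_pascal_to_camel_py := by
  intro name _
  unfold Spec_pascal_to_camel_py pascal_to_camel_py pascal_to_camel_py_alt
  by_cases hne : name = ""
  · simp [hne]
  · simp only [if_neg hne]
    have hl : name.toList ≠ [] := by
      intro h
      exact hne (by simpa using congrArg String.ofList h)
    set C := (name.toList.takeWhile PySem.Chars.isupper).length with hC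
    have hloop : pvLoopA name.toList 0 = max C 1 - 1 :=
      pvLoopA_eq name.toList 0 (by omega) hl
    have hB : pvAltRec name.toList =
        (name.toList.take (max (C - 1) 1)).map PySem.Chars.lowerChar
          ++ name.toList.drop (max (C - 1) 1) := pvAltRec_eq name.toList hl
    simp only [hloop]
    by_cases hC1 : C ≤ 1
    · rw [if_pos (by omega : max C 1 - 1 = 0)]
      rw [branch_zero_eq name hl, hB, (by omega : max (C - 1) 1 = 1)]
    · rw [if_neg (by omega : ¬ max C 1 - 1 = 0), lower_cut_eq, hB,
        (by omega : max C 1 - 1 = max (C - 1) 1)]
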